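-- pv_equiv track=rewrite | github.com/daniel-reich/ubiquitous-fiesta | xFme9FBuvHLveh5nE_18.py | is_zygodrome
-- ===== SOURCE A (Python) =====
-- def is_zygodrome(num):
--   snum = str(num)
--   if len(snum) < 2:
--     return False
--   cnt = 1
--   chk = snum[0]
--   for c in snum[1:]:
--     if c != chk:
--       if cnt < 2:
--         return False
--       cnt = 0
--       chk = c
--     cnt += 1
--   return cnt > 1
-- ===== SOURCE B (Python) =====
-- def is_zygodrome(num):
--     s = str(num)
--     return all((i > 0 and s[i] == s[i - 1]) or (i + 1 < len(s) and s[i] == s[i + 1])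
--                for i in range(len(s)))
-- ===== Notes on version B (the rewrite author's own statement) =====
-- stated objective: simpler
-- what changed: Replaces A's stateful run-counter loop with early exits by a single uniform check that every character of str(num) equals an adjacent neighbour (which characterises all runs having length >= 2), so the explicit len<2 guard, counter and reset logic disappear.
import Mathlib
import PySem

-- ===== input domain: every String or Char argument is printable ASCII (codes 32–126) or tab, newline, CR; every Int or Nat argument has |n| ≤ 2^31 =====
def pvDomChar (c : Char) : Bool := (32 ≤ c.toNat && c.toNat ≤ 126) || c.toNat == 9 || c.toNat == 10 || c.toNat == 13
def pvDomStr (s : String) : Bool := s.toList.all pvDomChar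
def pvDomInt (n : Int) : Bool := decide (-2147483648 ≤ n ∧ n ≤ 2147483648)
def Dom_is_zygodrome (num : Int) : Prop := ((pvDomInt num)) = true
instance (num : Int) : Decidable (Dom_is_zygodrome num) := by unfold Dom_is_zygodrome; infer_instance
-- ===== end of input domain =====

-- B replaces A's stateful run-counter loop (with early exits) by a uniform
-- "every character equals an adjacent neighbour" check; same cost, simpler shape.

-- ===== PORT A =====
-- the 'for c in snum[1:]' loop of A, state (cnt, chk); early 'return False' = result false
def pvLoopA : List Char → Int → Char → Bool
  | [], cnt, _ => decide (cnt > 1)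
  | c :: rest, cnt, chk =>
    if c ≠ chk then
      if cnt < 2 then false
      else pvLoopA rest 1 c
    else pvLoopA rest (cnt + 1) chk

def is_zygodrome (num : Int) : Bool :=
  let snum := PySem.Int.toChars num          -- str(num) as its character list
  if snum.length < 2 then false
  else
    match snum with
    | [] => false                            -- unreachable: length ≥ 2
    | chk :: rest => pvLoopA rest 1 chk      -- cnt = 1, chk = snum[0], loop over snum[1:]

-- ===== PORT B =====
def is_zygodrome_alt (num : Int) : Bool :=
  let s := PySem.Int.toChars num             -- str(num) as its character list
  (List.range s.length).all (fun i =>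
    (decide (0 < i) && (s.getD i ' ' == s.getD (i - 1) ' ')) ||
    (decide (i + 1 < s.length) && (s.getD i ' ' == s.getD (i + 1) ' ')))

-- ===== PRECONDITION & SPEC =====
def Spec_is_zygodrome (num : Int) (out : Bool) : Prop := out = is_zygodrome_alt num
instance (num : Int) (out : Bool) : Decidable (Spec_is_zygodrome num out) := by unfold Spec_is_zygodrome; infer_instance

-- ===== CLAIM (what is proved, stated in full; the proofs are below) =====
def Claim_equal_is_zygodrome : Prop := ∀ (num : Int), Dom_is_zygodrome num → Spec_is_zygodrome num (is_zygodrome num)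

-- ===== LEMMAS AND PROOFS =====

-- "every char of the list, with previous char p to its left, has an equal neighbour"
def pvNb : Char → List Char → Bool
  | _, [] => true
  | p, c :: r => ((c == p) || (match r with | [] => false | d :: _ => c == d)) && pvNb c r

lemma pvLoopA_eq (l : List Char) : ∀ (cnt : Int) (chk : Char), 1 ≤ cnt →
    pvLoopA l cnt chk =
      if 2 ≤ cnt then pvNb chk l
      else match l with | [] => false | c :: r => (c == chk) && pvNb chk r := by
  induction l with
  | nil =>
    intro cnt chk h
    simp only [pvLoopA, pvNb]
    split_ifs with h2 <;> simp <;> omega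
  | cons c r ih =>
    intro cnt chk h
    by_cases hc : c = chk
    · subst hc
      simp only [pvLoopA, ne_eq, not_true_eq_false, if_false]
      rw [ih (cnt + 1) c (by omega), if_pos (by omega)]
      split_ifs with h2
      · cases r with
        | nil => simp [pvNb]
        | cons d r' => simp [pvNb]
      · simp
    · rw [show pvLoopA (c :: r) cnt chk = if cnt < 2 then false else pvLoopA r 1 c by
        simp [pvLoopA, hc]]
      split_ifs with h1 h2
      · omega
      · -- cnt < 2 : both sides false
        simp [beq_iff_eq, hc]
      · -- 2 ≤ cnt : real case
        rw [ih 1 c (by omega), if_neg (by omega)]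
        cases r with
        | nil => simp [pvNb, hc]
        | cons d r' =>
          by_cases hd : d = c
          · subst hd; simp [pvNb]
          · simp [pvNb, beq_eq_false_iff_ne.mpr hd, beq_eq_false_iff_ne.mpr (Ne.symm hd),
              beq_eq_false_iff_ne.mpr hc]
      · omega

lemma pvAlt_nb (r : List Char) : ∀ (p : Char),
    (List.range r.length).all (fun i =>
      ((r.getD i ' ' == (if i = 0 then p else r.getD (i - 1) ' '))) ||
      (decide (i + 1 < r.length) && (r.getD i ' ' == r.getD (i + 1) ' '))) = pvNb p r := by
  induction r with
  | nil => intro p; simp [pvNb]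
  | cons c t ih =>
    intro p
    rw [List.length_cons, List.range_succ_eq_map, List.all_cons, List.all_map]
    have hf : ((fun i =>
        ((c :: t).getD i ' ' == if i = 0 then p else (c :: t).getD (i - 1) ' ') ||
        (decide (i + 1 < t.length + 1) && ((c :: t).getD i ' ' == (c :: t).getD (i + 1) ' '))) ∘ Nat.succ)
        = (fun i => (t.getD i ' ' == (if i = 0 then c else t.getD (i - 1) ' ')) ||
            (decide (i + 1 < t.length) && (t.getD i ' ' == t.getD (i + 1) ' '))) := by
      funext i
      cases i with
      | zero => simp
      | succ j => simp
    rw [hf, ih c]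
    -- head term
    cases t with
    | nil => simp [pvNb]
    | cons d t' => simp [pvNb, Nat.lt_iff_add_one_le]

lemma toChars_ne_nil (n : Int) : PySem.Int.toChars n ≠ [] := by
  unfold PySem.Int.toChars
  split
  · simp
  · have h := (Nat.length_toDigits_pos : 0 < (Nat.toDigits 10 n.toNat).length)
    intro hnil
    rw [hnil] at h
    simp at h

-- ===== VERDICT (by name: the statement is the Claim_ definition above) =====
theorem is_zygodrome_spec : Claim_equal_is_zygodrome := by
  intro num _
  unfold Spec_is_zygodrome is_zygodrome is_zygodrome_alt
  cases hS : PySem.Int.toChars num with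
  | nil => exact absurd hS (toChars_ne_nil num)
  | cons c r =>
    show (if (c :: r).length < 2 then false else pvLoopA r 1 c)
        = (List.range (c :: r).length).all (fun i =>
            (decide (0 < i) && ((c :: r).getD i ' ' == (c :: r).getD (i - 1) ' ')) ||
            (decide (i + 1 < (c :: r).length) && ((c :: r).getD i ' ' == (c :: r).getD (i + 1) ' ')))
    rw [List.length_cons, List.range_succ_eq_map, List.all_cons, List.all_map]
    have hf : ((fun i =>
        (decide (0 < i) && ((c :: r).getD i ' ' == (c :: r).getD (i - 1) ' ')) ||
        (decide (i + 1 < r.length + 1) && ((c :: r).getD i ' ' == (c :: r).getD (i + 1) ' '))) ∘ Nat.succ)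
        = (fun i => (r.getD i ' ' == (if i = 0 then c else r.getD (i - 1) ' ')) ||
            (decide (i + 1 < r.length) && (r.getD i ' ' == r.getD (i + 1) ' '))) := by
      funext i
      cases i with
      | zero => simp
      | succ j => simp
    rw [hf, pvAlt_nb r c]
    cases r with
    | nil => simp
    | cons d r' =>
      rw [if_neg (by simp)]
      rw [pvLoopA_eq (d :: r') 1 c (by omega), if_neg (by omega)]
      by_cases hd : d = c
      · subst hd; simp [pvNb]
      · simp [pvNb, beq_eq_false_iff_ne.mpr hd, beq_eq_false_iff_ne.mpr (Ne.symm hd), Nat.lt_iff_add_one_le]
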